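-- pv_equiv track=rewrite | github.com/TheJim123/Projekt-Tomo-vaje | resitve/metode.py | je_seznam_ciklov
-- ===== SOURCE A (Python) =====
-- def je_seznam_ciklov(sez):
--     good = []
--     if sez == [[]]:
--         return True
--     else:
--         for item in sez:
--             for i in item:
--                 if (i in good) or (i < 1):
--                     return False
--                 else:
--                     good.append(i)
--         return True
-- ===== SOURCE B (Python) =====
-- def je_seznam_ciklov(sez):
--     flat = [i for item in sez for i in item]
--     return all(i >= 1 for i in flat) and len(flat) == len(set(flat))
-- ===== Notes on version B (the rewrite author's own statement) =====
-- stated objective: simpler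
-- what changed: Replaces the incremental seen-list with an inner membership scan and early returns by flattening once and checking two aggregate conditions (all >= 1, and distinctness via set cardinality); the [[]] special case disappears because it falls out of the aggregates.
import Mathlib
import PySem

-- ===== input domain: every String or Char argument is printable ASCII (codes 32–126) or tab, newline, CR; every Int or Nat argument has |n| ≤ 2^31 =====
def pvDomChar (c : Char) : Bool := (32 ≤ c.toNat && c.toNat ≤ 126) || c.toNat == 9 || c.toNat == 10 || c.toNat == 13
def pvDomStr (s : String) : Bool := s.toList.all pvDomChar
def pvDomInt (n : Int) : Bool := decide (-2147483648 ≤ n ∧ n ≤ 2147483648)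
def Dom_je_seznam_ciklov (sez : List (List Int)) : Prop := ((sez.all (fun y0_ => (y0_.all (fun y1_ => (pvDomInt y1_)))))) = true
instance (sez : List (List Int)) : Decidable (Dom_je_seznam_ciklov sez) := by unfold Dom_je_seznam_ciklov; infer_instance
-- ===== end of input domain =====

-- B flattens once and returns the conjunction of two aggregate checks (all ≥ 1, distinctness
-- via set cardinality) instead of A's incremental seen-list with early returns; simpler.

-- ===== PORT A =====
-- inner 'for i in item' loop over the 'good' accumulator; none = 'return False'
def pvRunItem (good : List Int) : List Int → Option (List Int)
  | [] => some good
  | i :: rest =>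
      if good.contains i || i < 1 then none
      else pvRunItem (good ++ [i]) rest

-- outer 'for item in sez' loop
def pvRunAll (good : List Int) : List (List Int) → Option (List Int)
  | [] => some good
  | item :: rest =>
      match pvRunItem good item with
      | none => none
      | some g => pvRunAll g rest

def je_seznam_ciklov (sez : List (List Int)) : Bool :=
  if sez = [[]] then true
  else (pvRunAll [] sez).isSome

-- ===== PORT B =====
def je_seznam_ciklov_alt (sez : List (List Int)) : Bool :=
  let flat := sez.flatten
  flat.all (fun i => 1 ≤ i) && (PySem.Set.ofList flat).length == flat.length

-- ===== PRECONDITION & SPEC =====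
def Spec_je_seznam_ciklov (sez : List (List Int)) (out : Bool) : Prop := out = je_seznam_ciklov_alt sez
instance (sez : List (List Int)) (out : Bool) : Decidable (Spec_je_seznam_ciklov sez out) := by unfold Spec_je_seznam_ciklov; infer_instance

-- ===== CLAIM (what is proved, stated in full; the proofs are below) =====
def Claim_equal_je_seznam_ciklov : Prop := ∀ (sez : List (List Int)), Dom_je_seznam_ciklov sez → Spec_je_seznam_ciklov sez (je_seznam_ciklov sez)

-- ===== LEMMAS AND PROOFS =====

-- success of the inner loop = the new elements are ≥ 1 and good ++ item stays duplicate-free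
theorem pvRunItem_char (item : List Int) (good : List Int) (hg : good.Nodup) :
    pvRunItem good item =
      if item.all (fun i => 1 ≤ i) ∧ (good ++ item).Nodup then some (good ++ item) else none := by
  induction item generalizing good with
  | nil => simp [pvRunItem, hg]
  | cons i rest ih =>
      by_cases hmem : i ∈ good
      · have hcond : ¬ ((i :: rest).all (fun i => 1 ≤ i) = true ∧ (good ++ i :: rest).Nodup) := by
          rintro ⟨-, hn⟩
          exact List.disjoint_of_nodup_append hn hmem (by simp)
        rw [pvRunItem, if_pos (by simp [hmem]), if_neg hcond]
      · by_cases hlt : i < 1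
        · have h1 : ¬ (1 : Int) ≤ i := by omega
          simp [pvRunItem, hmem, hlt, h1]
        · have hg' : (good ++ [i]).Nodup := by
            rw [List.nodup_append]
            refine ⟨hg, List.nodup_singleton i, ?_⟩
            intro a ha b hb hab
            have hbi : b = i := by simpa using hb
            exact hmem (hbi ▸ hab ▸ ha)
          have h1 : (1 : Int) ≤ i := by omega
          rw [pvRunItem, if_neg (by simp [hmem, hlt]), ih (good ++ [i]) hg']
          simp [h1, List.append_assoc]

-- success of the whole loop = every element ≥ 1 and good ++ flatten stays duplicate-free
theorem pvRunAll_char (sez : List (List Int)) (good : List Int) (hg : good.Nodup) :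
    (pvRunAll good sez).isSome =
      (sez.flatten.all (fun i => 1 ≤ i) && decide (good ++ sez.flatten).Nodup) := by
  induction sez generalizing good with
  | nil => simp [pvRunAll, hg]
  | cons item rest ih =>
      rw [pvRunAll, pvRunItem_char item good hg]
      by_cases h : item.all (fun i => 1 ≤ i) ∧ (good ++ item).Nodup
      · rw [if_pos h]
        have hrec := ih (good ++ item) h.2
        simp only [hrec, List.flatten_cons, List.all_append, h.1, List.append_assoc,
          Bool.true_and]
        rfl
      · rw [if_neg h]
        rcases (not_and_or.mp h) with h1 | h2
        · have hb : item.all (fun i => 1 ≤ i) = false := by simpa using h1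
          simp [List.flatten_cons, hb]
        · have hsub' : (good ++ item).Sublist (good ++ (item ++ rest.flatten)) :=
            (List.append_sublist_append_left good).mpr (List.sublist_append_left item rest.flatten)
          have hnd : ¬ (good ++ (item ++ rest.flatten)).Nodup :=
            fun hc => h2 (List.Sublist.nodup hsub' hc)
          simp [List.flatten_cons, hnd]

-- equal set cardinality forces Nodup
theorem pvNodup_of_len_eq (xs : List Int) (h : (PySem.Set.ofList xs).length = xs.length) :
    xs.Nodup := by
  induction xs with
  | nil => simp
  | cons x xs ih =>
      rw [PySem.Set.ofList_cons] at h
      simp only [List.length_cons] at h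
      have hd : (PySem.Set.discard (PySem.Set.ofList xs) x).length = xs.length := by omega
      have hfil : (PySem.Set.discard (PySem.Set.ofList xs) x).length ≤ (PySem.Set.ofList xs).length := by
        simpa [PySem.Set.discard] using List.length_filter_le (fun y => !(y == x)) (PySem.Set.ofList xs)
      have hle := PySem.Set.length_ofList_le (xs := xs)
      have hlen : (PySem.Set.ofList xs).length = xs.length := le_antisymm hle (hd ▸ hfil)
      have hnx : x ∉ PySem.Set.ofList xs := by
        intro hx
        have hlt : (List.filter (fun y => !(y == x)) (PySem.Set.ofList xs)).length
            < (PySem.Set.ofList xs).length :=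
          List.length_filter_lt_length_iff_exists.mpr ⟨x, hx, by simp⟩
        have hlt' : ((PySem.Set.ofList xs).discard x).length < (PySem.Set.ofList xs).length := by
          simpa [PySem.Set.discard] using hlt
        omega
      exact List.nodup_cons.mpr ⟨by simpa [PySem.Set.mem_ofList] using hnx, ih hlen⟩

-- set-cardinality test = Nodup
theorem pvLenOfList_iff (xs : List Int) :
    ((PySem.Set.ofList xs).length == xs.length) = decide xs.Nodup := by
  by_cases h : xs.Nodup
  · rw [PySem.Set.ofList_eq_self_of_nodup (xs := xs)]
    · simp [h]
    · exact h
  · have hne : (PySem.Set.ofList xs).length ≠ xs.length := fun he => h (pvNodup_of_len_eq xs he)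
    simp [h, hne]

-- ===== VERDICT (by name: the statement is the Claim_ definition above) =====
theorem je_seznam_ciklov_spec : Claim_equal_je_seznam_ciklov := by
  intro sez _
  unfold Spec_je_seznam_ciklov je_seznam_ciklov
  simp only [je_seznam_ciklov_alt]
  by_cases hsz : sez = [[]]
  · subst hsz; decide
  · rw [if_neg hsz, pvRunAll_char sez [] List.nodup_nil, pvLenOfList_iff]
    simp
    rfl
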